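-- pv_equiv track=rewrite | github.com/okcd00/CDKeeper | Offer_exam/20220819 Microsoft CT3/A.py | solution
-- ===== SOURCE A (Python) =====
-- def solution(X, Y, W):
--     ret = 0
--     has_potholes = sorted(set(X))
--
--     pivot = 0
--     while pivot < len(has_potholes):
--         cur = has_potholes[pivot]
--         ret += 1
--         while has_potholes[pivot] <= cur + W:
--             pivot += 1
--             if pivot == len(has_potholes):
--                 break
--     return ret
-- ===== SOURCE B (Python) =====
-- def solution(X, Y, W):
--     # Selection-based: no sorting and no dedup. Repeatedly take the minimum of
--     # the remaining raw positions and discard every position the interval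
--     # starting there covers (<= min + W); each round is one interval.
--     remaining = list(X)
--     ret = 0
--     while remaining:
--         m = min(remaining)
--         remaining = [p for p in remaining if p > m + W]
--         ret += 1
--     return ret
-- ===== Notes on version B (the rewrite author's own statement) =====
-- stated objective: alternative
-- what changed: Replaced A's sort-once-then-scan greedy (sorted(set(X)) traversed with nested index-advancing while loops) by a selection-based algorithm with no sorting and no dedup: repeatedly take min() of the remaining raw list and filter away every position <= min+W, counting one interval per round; Pre_ excludes negative W with nonempty X, where both A's and B's while loops diverge.
import Mathlib
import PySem

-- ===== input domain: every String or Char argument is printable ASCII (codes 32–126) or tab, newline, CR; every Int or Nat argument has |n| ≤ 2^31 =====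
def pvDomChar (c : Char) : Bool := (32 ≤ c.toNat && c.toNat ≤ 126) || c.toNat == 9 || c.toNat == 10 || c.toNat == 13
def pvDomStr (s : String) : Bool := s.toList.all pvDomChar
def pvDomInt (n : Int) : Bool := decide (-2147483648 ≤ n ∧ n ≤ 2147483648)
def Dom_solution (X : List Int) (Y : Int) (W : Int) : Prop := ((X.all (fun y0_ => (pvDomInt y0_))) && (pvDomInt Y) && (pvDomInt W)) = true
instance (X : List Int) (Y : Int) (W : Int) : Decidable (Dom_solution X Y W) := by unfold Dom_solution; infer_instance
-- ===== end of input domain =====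

-- B replaces A's sort-once-then-scan greedy by a selection-based algorithm with
-- no sorting and no dedup: repeated min extraction + filter (objective: alternative).

-- ===== PORT A =====
-- inner while loop: 'while has_potholes[pivot] <= cur + W: pivot += 1; if pivot == len: break'
-- (the Python guard is only evaluated with pivot < len; the combined dite guard is exact)
def solutionInner (hp : List Int) (cur W : Int) (pivot : Nat) : Nat :=
  if h : pivot < hp.length ∧ hp[pivot]! ≤ cur + W then
    solutionInner hp cur W (pivot + 1)
  else pivot
termination_by hp.length - pivot
decreasing_by omega

-- outer while loop, fuel-bounded: with fuel = hp.length the fuel never runs out on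
-- any input where the Python loop terminates (exactly the inputs admitted by Pre_)
def solutionOuter (hp : List Int) (W : Int) (fuel : Nat) (pivot : Nat) (ret : Int) : Int :=
  match fuel with
  | 0 => ret
  | fuel + 1 =>
    if pivot < hp.length then
      solutionOuter hp W fuel (solutionInner hp (hp[pivot]!) W pivot) (ret + 1)
    else ret

def solution (X : List Int) (Y : Int) (W : Int) : Int :=
  let has_potholes := PySem.List.sorted (PySem.Set.ofList X) (fun x => x) false
  solutionOuter has_potholes W has_potholes.length 0 0

-- ===== PORT B =====
-- 'while remaining: m = min(remaining); remaining = [p for p in remaining if p > m + W]; ret += 1'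
-- fuel-bounded: fuel = |X| suffices on every input where the Python loop terminates
-- (exactly the inputs admitted by Pre_, since each round removes at least the minimum)
def solutionAltLoop (W : Int) (fuel : Nat) (remaining : List Int) (ret : Int) : Int :=
  match fuel with
  | 0 => ret
  | fuel + 1 =>
    match PySem.List.min? remaining (fun x => x) with
    | none => ret
    | some m => solutionAltLoop W fuel (remaining.filter (fun p => decide (m + W < p))) (ret + 1)

def solution_alt (X : List Int) (Y : Int) (W : Int) : Int :=
  solutionAltLoop W X.length X 0

-- ===== PRECONDITION & SPEC =====
-- A diverges (inner while never advances pivot) whenever W < 0 and X is nonempty;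
-- Pre_ excludes exactly those inputs, on which A returns nothing at all.
def Pre_solution (X : List Int) (Y : Int) (W : Int) : Prop := X = [] ∨ 0 ≤ W
instance (X : List Int) (Y : Int) (W : Int) : Decidable (Pre_solution X Y W) := by
  unfold Pre_solution; infer_instance

def pvWitness_solution : List Int × Int × Int := ([1, 3, 5, 3], 0, 2)

def Spec_solution (X : List Int) (Y : Int) (W : Int) (out : Int) : Prop := out = solution_alt X Y W
instance (X : List Int) (Y : Int) (W : Int) (out : Int) : Decidable (Spec_solution X Y W out) := by
  unfold Spec_solution; infer_instance

-- ===== CLAIM (what is proved, stated in full; the proofs are below) =====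
def Claim_equal_solution : Prop := ∀ (X : List Int) (Y : Int) (W : Int), Dom_solution X Y W → Pre_solution X Y W → Spec_solution X Y W (solution X Y W)

-- ===== LEMMAS AND PROOFS =====

-- common characterisation: the greedy covering count of a (sorted) list
def pvGreedy : List Int → Int → Int
  | [], _ => 0
  | x :: xs, W => 1 + pvGreedy (xs.dropWhile (fun y => decide (y ≤ x + W))) W
termination_by l _ => l.length
decreasing_by
  calc (List.dropWhile (fun y => decide (y ≤ x + W)) xs).length
      ≤ xs.length := List.length_dropWhile_le _ _
    _ < (x :: xs).length := by simp

theorem pvInner_eq (hp : List Int) (cur W : Int) (pivot : Nat) (hle : pivot ≤ hp.length) :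
    solutionInner hp cur W pivot =
      pivot + ((hp.drop pivot).takeWhile (fun y => decide (y ≤ cur + W))).length := by
  fun_induction solutionInner hp cur W pivot with
  | case1 pivot h ih =>
    obtain ⟨hlt, hc⟩ := h
    have hdrop : hp.drop pivot = hp[pivot] :: hp.drop (pivot + 1) :=
      List.drop_eq_getElem_cons hlt
    have hbang : hp[pivot]! = hp[pivot] := getElem!_pos hp pivot hlt
    have hc' : decide (hp[pivot] ≤ cur + W) = true := by
      rw [hbang] at hc; simpa using hc
    rw [ih (by omega), hdrop, List.takeWhile_cons, hc']
    simp
    omega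
  | case2 pivot h =>
    by_cases hlt : pivot < hp.length
    · have hc : ¬ hp[pivot]! ≤ cur + W := fun hc => h ⟨hlt, hc⟩
      have hdrop : hp.drop pivot = hp[pivot] :: hp.drop (pivot + 1) :=
        List.drop_eq_getElem_cons hlt
      have hbang : hp[pivot]! = hp[pivot] := getElem!_pos hp pivot hlt
      rw [hbang] at hc
      rw [hdrop, List.takeWhile_cons]
      simp [hc]
    · have : hp.drop pivot = [] := List.drop_eq_nil_of_le (by omega)
      simp [this]

theorem pvDrop_takeWhile (l : List Int) (p : Int → Bool) :
    l.drop (l.takeWhile p).length = l.dropWhile p := by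
  induction l with
  | nil => simp
  | cons x xs ih =>
    by_cases h : p x <;>
      simp [h, ih]

theorem pvOuter_eq (fuel : Nat) (hp : List Int) (W : Int) (hW : 0 ≤ W) :
    ∀ (pivot : Nat) (ret : Int), hp.length - pivot ≤ fuel →
      solutionOuter hp W fuel pivot ret = ret + pvGreedy (hp.drop pivot) W := by
  induction fuel with
  | zero =>
    intro pivot ret hf
    have : hp.drop pivot = [] := List.drop_eq_nil_of_le (by omega)
    simp [solutionOuter, this, pvGreedy]
  | succ fuel ih =>
    intro pivot ret hf
    by_cases hlt : pivot < hp.length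
    · have hdrop : hp.drop pivot = hp[pivot] :: hp.drop (pivot + 1) :=
        List.drop_eq_getElem_cons hlt
      have hbang : hp[pivot]! = hp[pivot] := getElem!_pos hp pivot hlt
      have hinner : solutionInner hp (hp[pivot]!) W pivot =
          pivot + ((hp.drop pivot).takeWhile (fun y => decide (y ≤ hp[pivot]! + W))).length :=
        pvInner_eq hp _ W pivot (by omega)
      have hheadc : decide (hp[pivot] ≤ hp[pivot] + W) = true := by simp; omega
      have htw : ((hp.drop pivot).takeWhile (fun y => decide (y ≤ hp[pivot]! + W))).length =
          ((hp.drop (pivot + 1)).takeWhile (fun y => decide (y ≤ hp[pivot] + W))).length + 1 := by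
        rw [hbang, hdrop, List.takeWhile_cons, hheadc]
        simp
      have hge : pivot + 1 ≤ solutionInner hp (hp[pivot]!) W pivot := by omega
      have hdropinner : hp.drop (solutionInner hp (hp[pivot]!) W pivot) =
          (hp.drop pivot).dropWhile (fun y => decide (y ≤ hp[pivot] + W)) := by
        rw [hinner, hbang, ← pvDrop_takeWhile (hp.drop pivot), List.drop_drop]
      have hfuel : hp.length - solutionInner hp (hp[pivot]!) W pivot ≤ fuel := by omega
      rw [solutionOuter, if_pos hlt, ih _ _ hfuel, hdropinner]
      conv_rhs => rw [hdrop, pvGreedy]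
      rw [hdrop, List.dropWhile_cons, hheadc]
      simp [add_assoc]
    · have : hp.drop pivot = [] := List.drop_eq_nil_of_le (by omega)
      simp [solutionOuter, hlt, this, pvGreedy]

-- on a ≤-sorted list, dropWhile (· ≤ c) is filter (c < ·)
theorem pvDropWhile_eq_filter (c : Int) (l : List Int) (hs : l.Pairwise (· ≤ ·)) :
    l.dropWhile (fun y => decide (y ≤ c)) = l.filter (fun y => decide (c < y)) := by
  induction l with
  | nil => simp
  | cons x xs ih =>
    rw [List.pairwise_cons] at hs
    by_cases h : x ≤ c
    · simp [h, not_lt.mpr h, ih hs.2]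
    · have hcx : c < x := lt_of_not_ge h
      have : xs.filter (fun y => decide (c < y)) = xs := by
        apply List.filter_eq_self.mpr
        intro y hy
        have := hs.1 y hy
        simp; omega
      simp [h, hcx, this]

-- key step: one round of B on any raw list corresponds to one step of the greedy
-- on the sorted-distinct list
theorem pvStep_sorted (rs : List Int) (m W : Int) (hW : 0 ≤ W)
    (hmin : PySem.List.min? rs (fun x => x) = some m) :
    PySem.List.sorted (PySem.Set.ofList rs) (fun x => x) false =
      m :: ((PySem.List.sorted (PySem.Set.ofList rs) (fun x => x) false).tail) ∧
    (PySem.List.sorted (PySem.Set.ofList rs) (fun x => x) false).tail.dropWhile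
        (fun y => decide (y ≤ m + W)) =
      PySem.List.sorted (PySem.Set.ofList (rs.filter (fun p => decide (m + W < p))))
        (fun x => x) false := by
  have hmem : m ∈ rs := PySem.List.min?_mem hmin
  have hmin' : ∀ y ∈ rs, m ≤ y := PySem.List.min?_isMin hmin
  set s := PySem.List.sorted (PySem.Set.ofList rs) (fun x => x) false with hsdef
  have hslt : s.Pairwise (· < ·) := PySem.List.sorted_ofList_pairwise_lt rs
  have hsetmem : ∀ x, x ∈ s ↔ x ∈ rs := by
    intro x
    rw [hsdef, PySem.List.mem_sorted, PySem.Set.mem_ofList]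
  -- s is nonempty and its head is m
  obtain ⟨h, t, hst⟩ : ∃ h t, s = h :: t := by
    cases hcs : s with
    | nil =>
      exfalso
      have := (hsetmem m).mpr hmem
      rw [hcs] at this; simp at this
    | cons h t => exact ⟨h, t, rfl⟩
  have hhead : h = m := by
    have h1 : ∀ y ∈ PySem.Set.ofList rs, h ≤ y := by
      have := PySem.List.key_head_sorted_le (xs := PySem.Set.ofList rs)
        (key := fun x => x) (by rw [← hsdef, hst])
      simpa using this
    have hm_in : m ∈ PySem.Set.ofList rs := (PySem.Set.mem_ofList rs m).mpr hmem
    have hhm : h ≤ m := h1 m hm_in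
    have hh_in : h ∈ rs := (hsetmem h).mp (by rw [hst]; simp)
    have hmh : m ≤ h := hmin' h hh_in
    omega
  subst hhead
  refine ⟨by rw [hst]; rfl, ?_⟩
  rw [hst] at hslt
  rw [hst]
  simp only [List.tail_cons]
  rw [List.pairwise_cons] at hslt
  -- dropWhile on the sorted tail = filter on the sorted tail
  rw [pvDropWhile_eq_filter (h + W) t (hslt.2.imp (fun hab => le_of_lt hab))]
  -- name the sorted order of the filtered set via strict-sorted uniqueness
  symm
  apply PySem.List.sorted_eq_of_perm_of_pairwise_lt
  · -- permutation: same members, both nodup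
    have hnodup_t : t.Nodup := (List.Pairwise.imp (fun hab => ne_of_lt hab) hslt.2)
    have hnodup_f : (t.filter (fun y => decide (h + W < y))).Nodup :=
      hnodup_t.filter _
    rw [List.perm_ext_iff_of_nodup hnodup_f (PySem.Set.nodup_ofList _)]
    intro a
    rw [List.mem_filter, PySem.Set.mem_ofList, List.mem_filter]
    constructor
    · rintro ⟨hat, hc⟩
      have has : a ∈ rs := (hsetmem a).mp (by rw [hst]; simp [hat])
      exact ⟨has, hc⟩
    · rintro ⟨hars, hc⟩
      have has : a ∈ h :: t := by rw [← hst]; exact (hsetmem a).mpr hars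
      rcases List.mem_cons.mp has with rfl | hat
      · simp at hc; omega
      · exact ⟨hat, hc⟩
  · exact (hslt.2.filter _).imp (fun {a b} hab => hab)

-- B's loop computes the greedy count of the sorted-distinct list
theorem pvAltLoop_eq (W : Int) (hW : 0 ≤ W) :
    ∀ (fuel : Nat) (rs : List Int) (ret : Int), rs.length ≤ fuel →
      solutionAltLoop W fuel rs ret =
        ret + pvGreedy (PySem.List.sorted (PySem.Set.ofList rs) (fun x => x) false) W := by
  intro fuel
  induction fuel with
  | zero =>
    intro rs ret hf
    have : rs = [] := List.length_eq_zero_iff.mp (by omega)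
    subst this
    simp [solutionAltLoop, pvGreedy, PySem.Set.ofList, PySem.List.sorted]
  | succ fuel ih =>
    intro rs ret hf
    cases hmin : PySem.List.min? rs (fun x => x) with
    | none =>
      have : rs = [] := (PySem.List.min?_eq_none_iff rs _).mp hmin
      subst this
      simp [solutionAltLoop, hmin, pvGreedy, PySem.Set.ofList, PySem.List.sorted]
    | some m =>
      have hmem : m ∈ rs := PySem.List.min?_mem hmin
      obtain ⟨hcons, htail⟩ := pvStep_sorted rs m W hW hmin
      have hfuel : (rs.filter (fun p => decide (m + W < p))).length ≤ fuel := by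
        have hlt : (rs.filter (fun p => decide (m + W < p))).length < rs.length := by
          apply List.length_filter_lt_length_iff_exists.mpr
          exact ⟨m, hmem, by simp; omega⟩
        omega
      rw [solutionAltLoop, hmin]
      show solutionAltLoop W fuel (rs.filter (fun p => decide (m + W < p))) (ret + 1) = _
      rw [ih _ _ hfuel, ← htail]
      conv_rhs => rw [hcons, pvGreedy]
      ring

-- ===== VERDICT (by name: the statement is the Claim_ definition above) =====
theorem solution_spec : Claim_equal_solution := by
  intro X Y W _ hpre
  unfold Spec_solution solution solution_alt
  rcases hpre with hnil | hW
  · subst hnil; rfl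
  · rw [pvAltLoop_eq W hW X.length X 0 (le_refl _)]
    have := pvOuter_eq (PySem.List.sorted (PySem.Set.ofList X) (fun x => x) false).length
      (PySem.List.sorted (PySem.Set.ofList X) (fun x => x) false) W hW 0 0 (by omega)
    simpa using this
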